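-- pv_equiv track=rewrite | github.com/sourav-coder/GeeksForGeeks-Solutions | Minimum indexed character.py | printMinIndexChar
-- ===== SOURCE A (Python) =====
-- def printMinIndexChar(s,pat):
--     s=list(s)
--     pat=list(pat)
--     l=120
--     for i in pat:
--         if i in s:
--             l=min(l,s.index(i))
--
--     if l==120:
--         return '$'
--     else:
--         try:
--             return ''.join(s[l])
--         except:IndexError
-- ===== SOURCE B (Python) =====
-- def printMinIndexChar(s, pat):
--     chars = set(pat)
--     for c in s:
--         if c in chars:
--             return c
--     return '$'
-- ===== Notes on version B (the rewrite author's own statement) =====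
-- stated objective: faster
-- what changed: Instead of rescanning s with s.index for every pat character and taking the min (capped by a l=120 sentinel), B builds a set of pat's characters and makes one left-to-right pass over s, returning the first character found in the set; B also drops the sentinel cap, so it is correct on matches at index >= 120.
-- intended difference: On inputs whose earliest character belonging to pat occurs only at an index >= 120 (and that character is not '$' itself), A returns '$' because its l=120 sentinel caps real indices, while B returns that character, which is the intended minimum-index answer. — e.g. on printMinIndexChar(("aaaaaaaaaaaaaaaaaaaaaaaaaaaaaaaaaaaaaaaaaaaaaaaaaaaaaaaaaaaaaaaaaaaaaaaaaaaaaaaaaaaaaaaaaaaaaaaaaaaaaaaaaaaaaaaaaaaaa…): A returns "$", B returns "b"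
import Mathlib
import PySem

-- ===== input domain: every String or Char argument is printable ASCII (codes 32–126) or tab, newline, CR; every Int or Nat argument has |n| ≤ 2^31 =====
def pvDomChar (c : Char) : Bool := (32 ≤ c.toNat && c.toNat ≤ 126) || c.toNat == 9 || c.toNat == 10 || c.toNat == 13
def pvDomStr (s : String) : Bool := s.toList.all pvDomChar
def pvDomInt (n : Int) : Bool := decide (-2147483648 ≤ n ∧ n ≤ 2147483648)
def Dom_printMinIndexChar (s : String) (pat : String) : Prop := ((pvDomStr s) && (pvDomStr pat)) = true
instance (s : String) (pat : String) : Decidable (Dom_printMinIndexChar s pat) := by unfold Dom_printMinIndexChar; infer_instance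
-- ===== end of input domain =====

-- B replaces A's per-pat-char rescans of s (min of s.index, capped by an l=120 sentinel) with one
-- left-to-right pass over s against set(pat) (measured faster); B drops the sentinel, so on first
-- matches at index >= 120 (D_ below) A returns '$' while B returns the intended character.


-- ===== PORT A =====
-- A: for each pat char present in s, l = min(l, s.index(char)), starting from the sentinel 120;
-- '$' if l stayed 120, else s[l] (the try/except IndexError is unreachable there: l is a valid index).
def printMinIndexChar (s : String) (pat : String) : String :=
  -- sl, l mirror Python's  s = list(s)  and the running minimum l
  match (pat.toList.foldl
      (fun l i => if s.toList.contains i then min l ((PySem.List.index? s.toList i).getD l) else l) 120 : Nat) with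
  | l =>
  if l = 120 then "$"
  else
    match PySem.List.pyGet? s.toList (Int.ofNat l) with
    | some c => String.ofList [c]    -- ''.join(s[l]) : a one-char string
    | none => ""                     -- Python's bare 'except' would fall off returning None; unreachable (l < len s)

-- ===== PORT B =====
-- B: one pass over s; return the first character that is in set(pat), else '$'.
def bScan (chars : PySem.Set Char) : List Char → String
  | [] => "$"
  | c :: rest => if PySem.Set.contains chars c then String.ofList [c] else bScan chars rest

def printMinIndexChar_alt (s : String) (pat : String) : String :=
  bScan (PySem.Set.ofList pat.toList) s.toList

-- ===== PRECONDITION & SPEC =====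
-- On inputs whose earliest character belonging to pat occurs only at an index >= 120 (and that
-- character is not '$' itself), A returns '$' because its l=120 sentinel caps real indices, while
-- B returns that character, which is the intended minimum-index answer.
def D_printMinIndexChar (s : String) (pat : String) : Prop :=
  ∃ j < s.toList.length, 120 ≤ j ∧ s.toList.getD j ' ' ∈ pat.toList ∧
    s.toList.getD j ' ' ≠ '$' ∧ ∀ k < j, s.toList.getD k ' ' ∉ pat.toList

instance (s : String) (pat : String) : Decidable (D_printMinIndexChar s pat) := by
  unfold D_printMinIndexChar; infer_instance

def Spec_printMinIndexChar (s : String) (pat : String) (out : String) : Prop :=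
  ¬ D_printMinIndexChar s pat → out = printMinIndexChar_alt s pat
instance (s : String) (pat : String) (out : String) : Decidable (Spec_printMinIndexChar s pat out) := by
  unfold Spec_printMinIndexChar; infer_instance

def pvDiffWitness_printMinIndexChar : String × String :=
  ("aaaaaaaaaaaaaaaaaaaaaaaaaaaaaaaaaaaaaaaaaaaaaaaaaaaaaaaaaaaaaaaaaaaaaaaaaaaaaaaaaaaaaaaaaaaaaaaaaaaaaaaaaaaaaaaaaaaaaaaab", "b")

def pvDiffWitnessOut_printMinIndexChar : String × String := ("$", "b")

-- ===== CLAIM (what is proved, stated in full; the proofs are below) =====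
def Claim_unchanged_printMinIndexChar : Prop := ∀ (s : String) (pat : String), Dom_printMinIndexChar s pat → Spec_printMinIndexChar s pat (printMinIndexChar s pat)
def Claim_changed_printMinIndexChar : Prop := Dom_printMinIndexChar (pvDiffWitness_printMinIndexChar.1) (pvDiffWitness_printMinIndexChar.2) ∧ D_printMinIndexChar (pvDiffWitness_printMinIndexChar.1) (pvDiffWitness_printMinIndexChar.2) ∧ printMinIndexChar (pvDiffWitness_printMinIndexChar.1) (pvDiffWitness_printMinIndexChar.2) = pvDiffWitnessOut_printMinIndexChar.1 ∧ printMinIndexChar_alt (pvDiffWitness_printMinIndexChar.1) (pvDiffWitness_printMinIndexChar.2) = pvDiffWitnessOut_printMinIndexChar.2 ∧ pvDiffWitnessOut_printMinIndexChar.1 ≠ pvDiffWitnessOut_printMinIndexChar.2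
def Claim_exact_printMinIndexChar : Prop := ∀ (s : String) (pat : String), Dom_printMinIndexChar s pat → D_printMinIndexChar s pat → printMinIndexChar s pat ≠ printMinIndexChar_alt s pat

-- ===== LEMMAS AND PROOFS =====

-- abbreviation for A's fold step
def gStep (sl : List Char) (l : Nat) (i : Char) : Nat :=
  if sl.contains i then min l ((PySem.List.index? sl i).getD l) else l

theorem foldl_gStep (sl pl : List Char) (init : Nat) :
    pl.foldl (fun l i => if sl.contains i then min l ((PySem.List.index? sl i).getD l) else l) init
      = pl.foldl (gStep sl) init := rfl

-- no pat char occurs in s: the fold keeps its initial value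
theorem fold_no_match (sl : List Char) (pl : List Char) (h : ∀ i ∈ pl, i ∉ sl) :
    ∀ init, pl.foldl (gStep sl) init = init := by
  induction pl with
  | nil => intro init; rfl
  | cons i rest ih =>
    intro init
    have hi : sl.contains i = false := by
      simp only [List.contains_eq_mem, decide_eq_false_iff_not]
      exact h i (List.mem_cons_self ..)
    simp only [List.foldl_cons, gStep, hi, if_neg Bool.false_ne_true]
    exact ih (fun x hx => h x (List.mem_cons_of_mem _ hx)) init

theorem fold_le_init (sl pl : List Char) : ∀ init, pl.foldl (gStep sl) init ≤ init := by
  induction pl with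
  | nil => intro init; exact Nat.le_refl _
  | cons i rest ih =>
    intro init
    refine Nat.le_trans (ih _) ?_
    unfold gStep; split
    · exact Nat.min_le_left _ _
    · exact Nat.le_refl _

theorem fold_le_idx (sl pl : List Char) (i : Char) (hi : i ∈ pl) (hc : sl.contains i = true)
    (k : Nat) (hk : PySem.List.index? sl i = some k) :
    ∀ init, pl.foldl (gStep sl) init ≤ k := by
  induction pl with
  | nil => cases hi
  | cons j rest ih =>
    intro init
    rcases List.mem_cons.1 hi with rfl | hmem
    · simp only [List.foldl_cons, gStep, hc, if_pos, hk, Option.getD_some]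
      exact Nat.le_trans (fold_le_init sl rest _) (Nat.min_le_right _ _)
    · exact ih hmem _

theorem fold_ge (sl pl : List Char) (j : Nat)
    (h : ∀ i ∈ pl, ∀ k, PySem.List.index? sl i = some k → j ≤ k) :
    ∀ init, min j init ≤ pl.foldl (gStep sl) init := by
  induction pl with
  | nil => intro init; exact Nat.min_le_right _ _
  | cons i rest ih =>
    intro init
    simp only [List.foldl_cons]
    refine Nat.le_trans ?_ (ih (fun x hx => h x (List.mem_cons_of_mem _ hx)) (gStep sl init i))
    unfold gStep; split
    · rename_i hc
      have hmem : i ∈ sl := by simpa [List.contains_eq_mem] using hc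
      cases hidx : PySem.List.index? sl i with
      | none => exact absurd hmem (by simpa using (PySem.List.index?_eq_none_iff (xs := sl) (v := i)).1 hidx)
      | some k =>
        have hjk := h i (List.mem_cons_self ..) k hidx
        simp only [Option.getD_some]
        omega
    · exact Nat.le_refl _

-- B's scan on a list with no pat char
theorem bScan_no_match (pl : List Char) (sl : List Char) (h : ∀ c ∈ sl, c ∉ pl) :
    bScan (PySem.Set.ofList pl) sl = "$" := by
  induction sl with
  | nil => rfl
  | cons c rest ih =>
    have hc : PySem.Set.contains (PySem.Set.ofList pl) c = false := by
      simp only [Bool.eq_false_iff, ne_eq, PySem.Set.contains_iff, PySem.Set.mem_ofList]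
      exact h c (List.mem_cons_self ..)
    simp only [bScan, hc, if_neg Bool.false_ne_true]
    exact ih (fun x hx => h x (List.mem_cons_of_mem _ hx))

-- B's scan returns the first matching character
theorem bScan_first (pl : List Char) (sl : List Char) (j : Nat) (hj : j < sl.length)
    (hm : sl[j] ∈ pl) (hmin : ∀ k, (hk : k < j) → sl[k]'(Nat.lt_trans hk hj) ∉ pl) :
    bScan (PySem.Set.ofList pl) sl = String.ofList [sl[j]] := by
  induction sl generalizing j with
  | nil => cases (Nat.not_lt_zero j) hj
  | cons c rest ih =>
    cases j with
    | zero =>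
      have hc : PySem.Set.contains (PySem.Set.ofList pl) c = true := by
        rw [PySem.Set.contains_iff, PySem.Set.mem_ofList]
        simpa using hm
      simp only [bScan, hc, if_pos]
      rfl
    | succ j' =>
      have hc : PySem.Set.contains (PySem.Set.ofList pl) c = false := by
        simp only [Bool.eq_false_iff, ne_eq, PySem.Set.contains_iff, PySem.Set.mem_ofList]
        simpa using hmin 0 (Nat.succ_pos j')
      simp only [bScan, hc, if_neg Bool.false_ne_true]
      simpa using ih j' (Nat.lt_of_succ_lt_succ hj) (by simpa using hm)
        (fun k hk => by simpa using hmin (k+1) (Nat.succ_lt_succ hk))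

-- index? of the first character of s that belongs to pat is exactly its position
theorem index?_first (sl pl : List Char) (j : Nat) (hj : j < sl.length) (hm : sl[j] ∈ pl)
    (hmin : ∀ k, (hk : k < j) → sl[k]'(Nat.lt_trans hk hj) ∉ pl) :
    PySem.List.index? sl (sl[j]) = some j := by
  cases hidx : PySem.List.index? sl (sl[j]) with
  | none =>
    exact absurd (List.getElem_mem hj) ((PySem.List.index?_eq_none_iff sl (sl[j])).mp hidx)
  | some k =>
    rcases PySem.List.getElem_of_index?_eq_some hidx with ⟨hklen, hik, hlt⟩
    have hkj : ¬ k < j := fun hkj => hmin k hkj (hik ▸ hm)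
    have hjk : ¬ j < k := fun hjk => hlt j hjk rfl
    have : k = j := by omega
    rw [this]

-- A's fold when a first match at position j exists
theorem fold_eq_min (sl pl : List Char) (j : Nat) (hj : j < sl.length) (hm : sl[j] ∈ pl)
    (hmin : ∀ k, (hk : k < j) → sl[k]'(Nat.lt_trans hk hj) ∉ pl) :
    pl.foldl (gStep sl) 120 = min 120 j := by
  have hub1 := fold_le_init sl pl 120
  have hc : sl.contains (sl[j]) = true := by
    simp [List.contains_eq_mem, List.getElem_mem]
  have hub2 := fold_le_idx sl pl (sl[j]) hm hc j (index?_first sl pl j hj hm hmin) 120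
  have hlb := fold_ge sl pl j (fun i hi k hk => by
    rcases PySem.List.getElem_of_index?_eq_some hk with ⟨hklen, hik, _⟩
    by_contra hnle
    exact hmin k (by omega) (hik ▸ hi)) 120
  omega

-- both ports, written against the first-match characterisation
theorem main_outside (s pat : String) (hD : ¬ D_printMinIndexChar s pat) :
    printMinIndexChar s pat = printMinIndexChar_alt s pat := by
  unfold printMinIndexChar printMinIndexChar_alt
  rw [foldl_gStep]
  by_cases hmatch : ∃ n, n < s.toList.length ∧ s.toList.getD n ' ' ∈ pat.toList
  · have hspec := Nat.find_spec hmatch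
    set j := Nat.find hmatch with hjdef
    have hj : j < s.toList.length := hspec.1
    have hm : s.toList[j] ∈ pat.toList := by
      have := hspec.2; rwa [List.getD_eq_getElem _ _ hj] at this
    have hmin : ∀ k, (hk : k < j) → s.toList[k]'(Nat.lt_trans hk hj) ∉ pat.toList := by
      intro k hk hkm
      exact Nat.find_min hmatch hk ⟨Nat.lt_trans hk hj, by rwa [List.getD_eq_getElem]⟩
    rw [fold_eq_min s.toList pat.toList j hj hm hmin, bScan_first pat.toList s.toList j hj hm hmin]
    by_cases hj120 : j < 120
    · rw [show min 120 j = j by omega, if_neg (by omega)]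
      have hg : PySem.List.pyGet? s.toList (Int.ofNat j) = some (s.toList[j]) := by
        simp [PySem.List.pyGet?_natCast]
      rw [hg]
    · rw [show min 120 j = 120 by omega, if_pos rfl]
      have hdollar : s.toList[j] = '$' := by
        by_contra hne
        refine hD ⟨j, hj, by omega, ?_, ?_, ?_⟩
        · rwa [List.getD_eq_getElem]
        · rwa [List.getD_eq_getElem]
        · intro k hk
          rw [List.getD_eq_getElem _ _ (Nat.lt_trans hk hj)]
          exact hmin k hk
      rw [hdollar]
  · have hno : ∀ c ∈ s.toList, c ∉ pat.toList := by
      intro c hc hcp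
      rcases List.mem_iff_getElem.1 hc with ⟨k, hk, rfl⟩
      exact hmatch ⟨k, hk, by rwa [List.getD_eq_getElem]⟩
    rw [fold_no_match s.toList pat.toList (fun i hi hs => hno i hs hi), if_pos rfl,
      bScan_no_match pat.toList s.toList hno]

-- ===== VERDICT =====
theorem printMinIndexChar_spec : Claim_unchanged_printMinIndexChar := by
  intro s pat _
  unfold Spec_printMinIndexChar
  exact main_outside s pat

set_option maxRecDepth 40000 in
set_option maxHeartbeats 1000000 in
theorem printMinIndexChar_changed : Claim_changed_printMinIndexChar := by
  unfold Claim_changed_printMinIndexChar; decide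

theorem printMinIndexChar_tight : Claim_exact_printMinIndexChar := by
  intro s pat _ hD
  obtain ⟨j, hj, h120, hmem, hne, hminD⟩ := hD
  have hm : s.toList[j] ∈ pat.toList := by rwa [List.getD_eq_getElem _ _ hj] at hmem
  have hne' : s.toList[j] ≠ '$' := by rwa [List.getD_eq_getElem _ _ hj] at hne
  have hmin : ∀ k, (hk : k < j) → s.toList[k]'(Nat.lt_trans hk hj) ∉ pat.toList := by
    intro k hk
    have := hminD k hk
    rwa [List.getD_eq_getElem _ _ (Nat.lt_trans hk hj)] at this
  have hA : printMinIndexChar s pat = "$" := by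
    unfold printMinIndexChar
    rw [foldl_gStep, fold_eq_min s.toList pat.toList j hj hm hmin,
      show min 120 j = 120 by omega, if_pos rfl]
  have hB : printMinIndexChar_alt s pat = String.ofList [s.toList[j]] := by
    unfold printMinIndexChar_alt
    exact bScan_first pat.toList s.toList j hj hm hmin
  rw [hA, hB]
  intro h
  have := congrArg String.toList h
  simp [String.toList_ofList] at this
  exact hne' this.symm
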